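-- pv_equiv track=rewrite | github.com/drsanchis/blantarctic | BLAntartic_v0_1/prosite.py | convert_RE
-- ===== SOURCE A (Python) =====
-- def convert_RE(expression):
--     """
--     Convierte las expresiones regulares del fichero 'prosite.dat' al formato
--     reconocido por el paquete 're' de Python.
--     """
--     dict = {
--         '-' : '',
--         '{' : '[^',
--         '}' : ']',
--         '(' : '{',
--         ')' : '}',
--         'x' : '.',
--         '>' : '$',
--         '<' : '^'
--         }
--
--     for original, translation in dict.items():
--         expression = expression.replace(original, translation)
--
--     return str(expression)
-- ===== SOURCE B (Python) =====
-- def convert_RE(expression):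
--     """One left-to-right pass with an explicit if/elif chain per character,
--     appending translated pieces to an accumulator; no dict, no replace passes."""
--     out = []
--     for ch in expression:
--         if ch == '-':
--             pass
--         elif ch == '{':
--             out.append('[')
--             out.append('^')
--         elif ch == '}':
--             out.append(']')
--         elif ch == '(':
--             out.append('{')
--         elif ch == ')':
--             out.append('}')
--         elif ch == 'x':
--             out.append('.')
--         elif ch == '>':
--             out.append('$')
--         elif ch == '<':
--             out.append('^')
--         else:
--             out.append(ch)
--     return ''.join(out)
-- ===== Notes on version B (the rewrite author's own statement) =====
-- stated objective: alternative
-- what changed: Replaces eight sequential whole-string str.replace passes driven by a dict with a single left-to-right scan using an explicit if/elif chain that appends translated characters to an accumulator.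
import Mathlib
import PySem

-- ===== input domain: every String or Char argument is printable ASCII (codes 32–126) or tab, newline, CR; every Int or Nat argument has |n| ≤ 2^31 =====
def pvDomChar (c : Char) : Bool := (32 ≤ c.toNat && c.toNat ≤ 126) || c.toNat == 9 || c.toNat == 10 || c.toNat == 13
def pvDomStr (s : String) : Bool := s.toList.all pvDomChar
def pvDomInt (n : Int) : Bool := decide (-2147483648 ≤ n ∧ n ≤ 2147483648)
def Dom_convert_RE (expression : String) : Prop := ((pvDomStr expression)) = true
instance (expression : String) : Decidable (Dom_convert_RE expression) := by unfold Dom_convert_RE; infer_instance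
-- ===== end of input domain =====

-- B replaces A's eight dict-driven whole-string replace passes by one left-to-right scan with an if/elif chain and an accumulator (objective: alternative single-pass algorithm; not measured faster).

-- ===== PORT A =====
def convert_RE (expression : String) : String :=
  let d : PySem.Dict String String :=
    ((((((((PySem.Dict.empty.insert "-" "").insert "{" "[^").insert "}" "]").insert
      "(" "{").insert ")" "}").insert "x" ".").insert ">" "$").insert "<" "^")
  d.items.foldl (fun e p => PySem.Str.replace e p.1 p.2) expression

-- ===== PORT B =====
-- the loop body: the if/elif chain, pushing translated chars onto the (reversed) accumulator
def pvStepB (acc : List Char) (c : Char) : List Char :=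
  if c = '-' then acc
  else if c = '{' then '^' :: '[' :: acc
  else if c = '}' then ']' :: acc
  else if c = '(' then '{' :: acc
  else if c = ')' then '}' :: acc
  else if c = 'x' then '.' :: acc
  else if c = '>' then '$' :: acc
  else if c = '<' then '^' :: acc
  else c :: acc

def convert_RE_alt (expression : String) : String :=
  String.ofList ((expression.toList.foldl pvStepB []).reverse)

-- ===== PRECONDITION & SPEC =====
def Spec_convert_RE (expression : String) (out : String) : Prop := out = convert_RE_alt expression
instance (expression : String) (out : String) : Decidable (Spec_convert_RE expression out) := by unfold Spec_convert_RE; infer_instance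

-- ===== CLAIM (what is proved, stated in full; the proofs are below) =====
def Claim_equal_convert_RE : Prop := ∀ (expression : String), Dom_convert_RE expression → Spec_convert_RE expression (convert_RE expression)

-- ===== LEMMAS AND PROOFS =====

-- replace.go with a single-character pattern is a flatMap over the characters
lemma pv_go_single (o : Char) (nw : List Char) :
    ∀ (l : List Char) (fuel : Nat) (acc : List Char), l.length ≤ fuel →
      PySem.Chars.replace.go [o] nw fuel l acc
        = acc.reverse ++ l.flatMap (fun c => if c = o then nw else [c]) := by
  intro l
  induction l with
  | nil => intro fuel acc h; cases fuel <;> simp [PySem.Chars.replace.go]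
  | cons c t ih =>
    intro fuel acc h
    cases fuel with
    | zero => simp at h
    | succ f =>
      rw [PySem.Chars.replace.go]
      by_cases hc : c = o
      · subst hc
        simp [List.isPrefixOf, ih f _ (by simpa using h)]
      · simp [List.isPrefixOf, hc, Ne.symm hc, ih f _ (by simpa using h)]

lemma pv_replace_single (l : List Char) (o : Char) (nw : List Char) :
    PySem.Chars.replace l [o] nw = l.flatMap (fun c => if c = o then nw else [c]) := by
  rw [PySem.Chars.replace]
  simp [pv_go_single o nw l l.length [] (le_refl _)]

-- the per-character translation A's cascade realises
def pvTr (c : Char) : List Char :=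
  if c = '-' then [] else if c = '{' then ['[', '^'] else if c = '}' then [']']
  else if c = '(' then ['{'] else if c = ')' then ['}'] else if c = 'x' then ['.']
  else if c = '>' then ['$'] else if c = '<' then ['^'] else [c]

-- A's eight cascaded flatMaps act on each original character independently
lemma pv_chain_single (c : Char) :
    ((((((((if c = '-' then ([] : List Char) else [c]).flatMap
        (fun c => if c = '{' then ['[', '^'] else [c])).flatMap
        (fun c => if c = '}' then [']'] else [c])).flatMap
        (fun c => if c = '(' then ['{'] else [c])).flatMap
        (fun c => if c = ')' then ['}'] else [c])).flatMap
        (fun c => if c = 'x' then ['.'] else [c])).flatMap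
        (fun c => if c = '>' then ['$'] else [c])).flatMap
        (fun c => if c = '<' then ['^'] else [c])) = pvTr c := by
  by_cases h1 : c = '-'; · subst h1; decide
  by_cases h2 : c = '{'; · subst h2; decide
  by_cases h3 : c = '}'; · subst h3; decide
  by_cases h4 : c = '('; · subst h4; decide
  by_cases h5 : c = ')'; · subst h5; decide
  by_cases h6 : c = 'x'; · subst h6; decide
  by_cases h7 : c = '>'; · subst h7; decide
  by_cases h8 : c = '<'; · subst h8; decide
  simp [pvTr, h1, h2, h3, h4, h5, h6, h7, h8]

lemma pv_chain_eq (l : List Char) :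
    ((((((((l.flatMap (fun c => if c = '-' then [] else [c])).flatMap
        (fun c => if c = '{' then ['[', '^'] else [c])).flatMap
        (fun c => if c = '}' then [']'] else [c])).flatMap
        (fun c => if c = '(' then ['{'] else [c])).flatMap
        (fun c => if c = ')' then ['}'] else [c])).flatMap
        (fun c => if c = 'x' then ['.'] else [c])).flatMap
        (fun c => if c = '>' then ['$'] else [c])).flatMap
        (fun c => if c = '<' then ['^'] else [c])) = l.flatMap pvTr := by
  induction l with
  | nil => rfl
  | cons c t ih =>
    simp only [List.flatMap_cons, List.flatMap_append] at *
    rw [ih, ← pv_chain_single c]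

-- B's fold accumulates pvTr in reverse
lemma pv_foldB (l : List Char) : ∀ acc, l.foldl pvStepB acc = (l.flatMap pvTr).reverse ++ acc := by
  induction l with
  | nil => intro acc; simp
  | cons c t ih =>
    intro acc
    have hc : pvStepB acc c = (pvTr c).reverse ++ acc := by
      by_cases h1 : c = '-'; · subst h1; rfl
      by_cases h2 : c = '{'; · subst h2; rfl
      by_cases h3 : c = '}'; · subst h3; rfl
      by_cases h4 : c = '('; · subst h4; rfl
      by_cases h5 : c = ')'; · subst h5; rfl
      by_cases h6 : c = 'x'; · subst h6; rfl
      by_cases h7 : c = '>'; · subst h7; rfl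
      by_cases h8 : c = '<'; · subst h8; rfl
      simp [pvStepB, pvTr, h1, h2, h3, h4, h5, h6, h7, h8]
    simp only [List.foldl_cons, hc, ih, List.flatMap_cons, List.reverse_append]
    simp

-- ===== VERDICT (by name: the statement is the Claim_ definition above) =====
theorem convert_RE_spec : Claim_equal_convert_RE := by
  intro expression _
  show convert_RE expression = convert_RE_alt expression
  have hitems : (((((((((PySem.Dict.empty.insert "-" "").insert "{" "[^").insert "}" "]").insert
      "(" "{").insert ")" "}").insert "x" ".").insert ">" "$").insert "<" "^") :
      PySem.Dict String String).items
      = [("-",""),("{","[^"),("}","]"),("(","{"),(")","}"),("x","."),(">","$"),("<","^")] := by decide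
  rw [← String.toList_inj]
  simp only [convert_RE, convert_RE_alt]
  rw [hitems]
  simp only [List.foldl]
  rw [pv_foldB]
  simp only [PySem.Str.toList_replace]
  simp only [show ("" : String).toList = [] from by decide,
    show ("-" : String).toList = ['-'] from by decide,
    show ("{" : String).toList = ['{'] from by decide,
    show ("[^" : String).toList = ['[', '^'] from by decide,
    show ("}" : String).toList = ['}'] from by decide,
    show ("]" : String).toList = [']'] from by decide,
    show ("(" : String).toList = ['('] from by decide,
    show (")" : String).toList = [')'] from by decide,
    show ("x" : String).toList = ['x'] from by decide,
    show ("." : String).toList = ['.'] from by decide,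
    show (">" : String).toList = ['>'] from by decide,
    show ("$" : String).toList = ['$'] from by decide,
    show ("<" : String).toList = ['<'] from by decide,
    show ("^" : String).toList = ['^'] from by decide]
  simp only [pv_replace_single]
  rw [pv_chain_eq]
  simp
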